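-- pv_equiv track=rewrite | github.com/kyleyarwood/advent-of-code | 2015/day11/day11.py | two_nonoverlapping_pairs
-- ===== SOURCE A (Python) =====
-- def two_nonoverlapping_pairs(password):
--     overlapping = []
--
--     for i in range(len(password) - 1):
--         if password[i] == password[i+1] and password[i] not in overlapping:
--             overlapping.append(password[i])
--             if len(overlapping) == 2:
--                 return True
--
--     return False
-- ===== SOURCE B (Python) =====
-- def two_nonoverlapping_pairs(password):
--     chars = set()
--     i = 0
--     n = len(password)
--     while i < n:
--         j = i + 1
--         while j < n and password[j] == password[i]:
--             j += 1
--         if j - i >= 2: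
--             chars.add(password[i])
--         i = j
--     return len(chars) >= 2
-- ===== Notes on version B (the rewrite author's own statement) =====
-- stated objective: alternative
-- what changed: B replaces A's adjacent-index scan with an early-exit dedup list by a run-length decomposition: it walks the string run by run (inner loop finds the end of each maximal equal-char run), collects the characters of runs of length >= 2 into a set, and returns whether that set has at least two elements.
import Mathlib
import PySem

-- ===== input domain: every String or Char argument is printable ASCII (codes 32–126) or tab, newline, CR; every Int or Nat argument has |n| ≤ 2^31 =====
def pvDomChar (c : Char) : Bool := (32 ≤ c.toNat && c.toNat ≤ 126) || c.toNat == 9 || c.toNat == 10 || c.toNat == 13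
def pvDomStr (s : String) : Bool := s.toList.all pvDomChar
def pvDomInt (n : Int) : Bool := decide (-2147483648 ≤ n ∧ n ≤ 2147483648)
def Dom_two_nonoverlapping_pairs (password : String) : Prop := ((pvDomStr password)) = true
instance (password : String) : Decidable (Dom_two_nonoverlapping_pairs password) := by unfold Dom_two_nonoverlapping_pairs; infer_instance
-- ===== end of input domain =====

-- B scans the string run by run and counts distinct characters of runs of length ≥ 2,
-- instead of A's adjacent-pair scan with an early-exit accumulator list ('alternative', same cost).

-- ===== PORT A =====
-- A's loop over i in range(len-1): structural recursion over adjacent pairs,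
-- carrying the 'overlapping' list; early 'return True' when it reaches length 2.
def pvALoop : List Char → List Char → Bool
  | a :: b :: rest, ov =>
    if a == b && !(ov.contains a) then
      let ov' := ov ++ [a]
      if ov'.length == 2 then true else pvALoop (b :: rest) ov'
    else pvALoop (b :: rest) ov
  | _, _ => false

def two_nonoverlapping_pairs (password : String) : Bool :=
  pvALoop password.toList []

-- ===== PORT B =====
-- B's outer while loop: each step consumes one maximal run (the inner while loop =
-- takeWhile/dropWhile), adding the run's character to the set when the run has length ≥ 2.
def pvAltLoop : List Char → PySem.Set Char → PySem.Set Char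
  | [], s => s
  | c :: rest, s =>
    let run := rest.takeWhile (fun x => x == c)
    let s' := if 2 ≤ 1 + run.length then PySem.Set.add s c else s
    pvAltLoop (rest.dropWhile (fun x => x == c)) s'
termination_by l _ => l.length
decreasing_by
  have := List.length_dropWhile_le (fun x => x == c) rest
  simp; omega

def two_nonoverlapping_pairs_alt (password : String) : Bool :=
  decide (2 ≤ (pvAltLoop password.toList PySem.Set.empty).length)

-- ===== PRECONDITION & SPEC =====
def Spec_two_nonoverlapping_pairs (password : String) (out : Bool) : Prop := out = two_nonoverlapping_pairs_alt password
instance (password : String) (out : Bool) : Decidable (Spec_two_nonoverlapping_pairs password out) := by unfold Spec_two_nonoverlapping_pairs; infer_instance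

-- ===== CLAIM (what is proved, stated in full; the proofs are below) =====
def Claim_equal_two_nonoverlapping_pairs : Prop := ∀ (password : String), Dom_two_nonoverlapping_pairs password → Spec_two_nonoverlapping_pairs password (two_nonoverlapping_pairs password)

-- ===== LEMMAS AND PROOFS =====

-- Reference: the set of characters having an adjacent equal pair, in A's traversal order.
def pairChars : List Char → PySem.Set Char
  | a :: b :: rest => if a == b then PySem.Set.add (pairChars (b :: rest)) a else pairChars (b :: rest)
  | _ => PySem.Set.empty

theorem nodup_pairChars (l : List Char) : (pairChars l).Nodup := by
  induction l with
  | nil => simp [pairChars]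
  | cons a rest ih =>
    cases rest with
    | nil => simp [pairChars]
    | cons b r =>
      by_cases h : a = b
      · simp only [pairChars, h, beq_self_eq_true]
        exact PySem.Set.nodup_add _ _ ih
      · simp [pairChars, h, ih]

theorem mem_pairChars_run (c : Char) (rest : List Char) (x : Char) :
    x ∈ pairChars (c :: rest) ↔
      (rest.takeWhile (fun y => y == c) ≠ [] ∧ x = c) ∨ x ∈ pairChars (rest.dropWhile (fun y => y == c)) := by
  induction rest with
  | nil => simp [pairChars]
  | cons b r ih =>
    by_cases h : b = c
    · subst h
      simp only [List.takeWhile_cons, beq_self_eq_true, if_true, List.dropWhile_cons]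
      have h1 : pairChars (b :: b :: r) = PySem.Set.add (pairChars (b :: r)) b := by
        simp [pairChars]
      rw [h1, PySem.Set.mem_add, ih]
      by_cases hr : List.takeWhile (fun y => y == b) r = [] <;> simp [hr] <;> tauto
    · have hbc : (b == c) = false := by simp [h]
      have h1 : pairChars (c :: b :: r) = pairChars (b :: r) := by
        simp only [pairChars]
        rw [if_neg (by simp; exact fun hh => h hh.symm)]
      simp [hbc, h1]

theorem mem_altLoop (l : List Char) (s : PySem.Set Char) (x : Char) :
    x ∈ pvAltLoop l s ↔ x ∈ s ∨ x ∈ pairChars l := by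
  cases l with
  | nil => simp [pvAltLoop, pairChars]
  | cons c rest =>
    have ih := mem_altLoop (rest.dropWhile (fun y => y == c))
      (if 2 ≤ 1 + (rest.takeWhile (fun y => y == c)).length then PySem.Set.add s c else s) x
    rw [pvAltLoop, ih, mem_pairChars_run c rest x]
    have hs' : x ∈ (if 2 ≤ 1 + (rest.takeWhile (fun y => y == c)).length then PySem.Set.add s c else s)
        ↔ x ∈ s ∨ ((rest.takeWhile (fun y => y == c)) ≠ [] ∧ x = c) := by
      by_cases hr : rest.takeWhile (fun y => y == c) = []
      · simp [hr]
      · have hlen : 2 ≤ 1 + (rest.takeWhile (fun y => y == c)).length := by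
          have := List.length_pos_iff.mpr hr
          omega
        simp [hlen, PySem.Set.mem_add, hr]
    rw [hs']
    tauto
termination_by l.length
decreasing_by
  have := List.length_dropWhile_le (fun y => y == c) rest
  simp; omega

theorem nodup_altLoop (l : List Char) (s : PySem.Set Char) (hs : s.Nodup) :
    (pvAltLoop l s).Nodup := by
  cases l with
  | nil => simpa [pvAltLoop] using hs
  | cons c rest =>
    rw [pvAltLoop]
    apply nodup_altLoop
    split
    · exact PySem.Set.nodup_add _ _ hs
    · exact hs
termination_by l.length
decreasing_by
  have := List.length_dropWhile_le (fun y => y == c) rest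
  simp; omega

theorem length_altLoop (l : List Char) :
    (pvAltLoop l PySem.Set.empty).length = (pairChars l).length := by
  have hperm : (pvAltLoop l PySem.Set.empty).Perm (pairChars l) := by
    rw [List.perm_ext_iff_of_nodup (nodup_altLoop l _ (by simp [PySem.Set.empty])) (nodup_pairChars l)]
    intro x
    rw [mem_altLoop]
    simp [PySem.Set.empty]
  exact hperm.length_eq

theorem card_add_two (S : PySem.Set Char) (a : Char) (hS : S.Nodup) :
    (2 ≤ (PySem.Set.add S a).length) ↔ ∃ y ∈ S, y ≠ a := by
  rw [PySem.Set.add_eq_ite]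
  by_cases hm : a ∈ S
  · simp only [hm, if_true]
    constructor
    · intro h2
      rcases S with _ | ⟨z, _ | ⟨w, t⟩⟩
      · simp at hm
      · simp at h2
      · have hzw : z ≠ w := by simp [List.nodup_cons] at hS; tauto
        by_cases hz : z = a
        · exact ⟨w, by simp, by rw [← hz]; exact fun hw => hzw (hw ▸ rfl) |>.elim⟩
        · exact ⟨z, by simp, hz⟩
    · rintro ⟨y, hy, hya⟩
      rcases S with _ | ⟨z, _ | ⟨w, t⟩⟩
      · simp at hm
      · simp at hm hy; exact absurd (hy.trans hm.symm) hya
      · simp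
  · simp only [hm, if_false]
    rw [List.length_append]
    simp only [List.length_singleton]
    constructor
    · intro h2
      have : S ≠ [] := by intro h; simp [h] at h2
      rcases S with _ | ⟨z, t⟩
      · simp at this
      · exact ⟨z, by simp, fun hz => hm (hz ▸ (by simp))⟩
    · rintro ⟨y, hy, _⟩
      have := List.length_pos_of_mem hy
      omega

theorem aloop_char (l : List Char) :
    (pvALoop l [] = decide (2 ≤ (pairChars l).length)) ∧
      ∀ x, pvALoop l [x] = decide (∃ y ∈ pairChars l, y ≠ x) := by
  induction l with
  | nil => simp [pvALoop, pairChars]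
  | cons a rest ih =>
    cases rest with
    | nil => simp [pvALoop, pairChars]
    | cons b r =>
      by_cases hab : a = b
      · subst hab
        have hpc : pairChars (a :: a :: r) = PySem.Set.add (pairChars (a :: r)) a := by
          simp [pairChars]
        constructor
        · simp only [pvALoop, beq_self_eq_true, List.contains_nil, Bool.not_false, Bool.and_true,
            if_true, List.nil_append, List.length_singleton]
          norm_num
          rw [ih.2 a, hpc, decide_eq_decide]
          exact (card_add_two _ _ (nodup_pairChars (a :: r))).symm
        · intro x
          rw [pvALoop, hpc]
          by_cases hax : a = x
          · subst hax
            rw [if_neg (by simp)]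
            rw [ih.2 a]
            congr 1
            apply propext
            constructor
            · rintro ⟨y, hy, hya⟩; exact ⟨y, (PySem.Set.mem_add _ _ _).mpr (Or.inl hy), hya⟩
            · rintro ⟨y, hy, hya⟩
              rcases (PySem.Set.mem_add _ _ _).mp hy with h | h
              · exact ⟨y, h, hya⟩
              · exact absurd h hya
          · rw [if_pos (by simp [hax])]
            simp only [List.cons_append, List.nil_append, List.length_cons]
            norm_num
            exact ⟨a, Or.inr rfl, hax⟩
      · have hpc : pairChars (a :: b :: r) = pairChars (b :: r) := by
          simp [pairChars, hab]
        have hcond : ∀ ov : List Char, pvALoop (a :: b :: r) ov = pvALoop (b :: r) ov := by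
          intro ov
          rw [pvALoop]
          simp [hab]
        exact ⟨by rw [hcond, hpc, ih.1], fun x => by rw [hcond, hpc, ih.2 x]⟩

-- ===== VERDICT (by name: the statement is the Claim_ definition above) =====
theorem two_nonoverlapping_pairs_spec : Claim_equal_two_nonoverlapping_pairs := by
  intro password _
  unfold Spec_two_nonoverlapping_pairs two_nonoverlapping_pairs two_nonoverlapping_pairs_alt
  rw [(aloop_char password.toList).1, length_altLoop]
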